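-- pv_equiv track=rewrite | github.com/kazuki-tau/redable-code | part1/sample_code.py | find_user_clubs
-- ===== SOURCE A (Python) =====
-- from typing import Dict, List, Optional, Tuple
--
-- def find_user_clubs(clubs: Dict[str, List[str]], users: List[str]) -> Dict[str, List[str]]:
--     """
--     Find clubs for each user.
--
--     Args:
--         clubs (Dict[str, List[str]]): A dictionary mapping club names to a list of members.
--         users (List[str]): A list of user names.
--
--     Returns:
--         Dict[str, List[str]]: A dictionary mapping each user to a list of clubs they belong to.
--     """
--     user_clubs: Dict[str, List[str]] = {}
--     for user in users:
--         user_clubs[user] = []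
--         for club, members in clubs.items():
--             if user in members:
--                 user_clubs[user].append(club)
--     return user_clubs
-- ===== SOURCE B (Python) =====
-- def find_user_clubs(clubs, users):
--     index = {}
--     for club, members in clubs.items():
--         for member in dict.fromkeys(members):
--             index.setdefault(member, []).append(club)
--     return {user: index.get(user, []) for user in users}
-- ===== Notes on version B (the rewrite author's own statement) =====
-- stated objective: faster
-- what changed: Instead of scanning every club's member list once per user, B builds a member-to-clubs index in one pass over the clubs and answers each user by a single dictionary lookup.
import Mathlib
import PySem

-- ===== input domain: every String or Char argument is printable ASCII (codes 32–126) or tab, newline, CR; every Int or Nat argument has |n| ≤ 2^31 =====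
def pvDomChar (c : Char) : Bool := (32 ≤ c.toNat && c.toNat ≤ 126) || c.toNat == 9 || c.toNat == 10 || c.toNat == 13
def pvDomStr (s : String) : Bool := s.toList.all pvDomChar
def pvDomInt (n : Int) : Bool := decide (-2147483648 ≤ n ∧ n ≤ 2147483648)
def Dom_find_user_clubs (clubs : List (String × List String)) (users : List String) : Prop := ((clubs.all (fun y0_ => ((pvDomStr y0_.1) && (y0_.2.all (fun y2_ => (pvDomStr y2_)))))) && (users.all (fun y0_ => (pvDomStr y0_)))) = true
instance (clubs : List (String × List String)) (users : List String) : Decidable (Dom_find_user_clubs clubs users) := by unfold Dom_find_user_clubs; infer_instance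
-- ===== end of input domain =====

-- B replaces A's per-user scan of every member list by a one-pass member→clubs index, then one lookup per user (faster, asymptotic).

-- ===== PORT A =====
def find_user_clubs (clubs : List (String × List String)) (users : List String) : List (String × List String) :=
  (users.foldl (fun d user =>
      clubs.foldl (fun d p =>
          if user ∈ p.2 then d.modify user [] (fun l => l ++ [p.1]) else d)
        (d.insert user []))
    PySem.Dict.empty).items

-- ===== PORT B =====
-- index = {}; for club, members in clubs.items(): for member in dict.fromkeys(members): index.setdefault(member, []).append(club)
def fucIndex (clubs : List (String × List String)) : PySem.Dict String (List String) :=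
  clubs.foldl (fun d p =>
      (PySem.List.dedup p.2).foldl (fun d m => d.modify m [] (fun l => l ++ [p.1])) d)
    PySem.Dict.empty

def find_user_clubs_alt (clubs : List (String × List String)) (users : List String) : List (String × List String) :=
  let index := fucIndex clubs
  (users.foldl (fun d user => d.insert user (index.getD user [])) PySem.Dict.empty).items

-- ===== PRECONDITION & SPEC =====
def Spec_find_user_clubs (clubs : List (String × List String)) (users : List String) (out : List (String × List String)) : Prop := out = find_user_clubs_alt clubs users
instance (clubs : List (String × List String)) (users : List String) (out : List (String × List String)) : Decidable (Spec_find_user_clubs clubs users out) := by unfold Spec_find_user_clubs; infer_instance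

-- ===== CLAIM (what is proved, stated in full; the proofs are below) =====
def Claim_equal_find_user_clubs : Prop := ∀ (clubs : List (String × List String)) (users : List String), Dom_find_user_clubs clubs users → Spec_find_user_clubs clubs users (find_user_clubs clubs users)

-- ===== LEMMAS AND PROOFS =====

-- the list of clubs containing user u, in club order
def fucL (clubs : List (String × List String)) (u : String) : List String :=
  clubs.filterMap (fun p => if u ∈ p.2 then some p.1 else none)

theorem fuc_modify_eq_insert {κ ν : Type} [BEq κ] [LawfulBEq κ] (d : PySem.Dict κ ν) (k : κ) (d0 : ν) (f : ν → ν) :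
    d.modify k d0 f = d.insert k (f (d.getD k d0)) := by
  simp [PySem.Dict.modify]

-- A's inner loop, started with key u bound to v, just sets u to v ++ fucL clubs u
theorem fuc_innerA (clubs : List (String × List String)) (u : String)
    (d : PySem.Dict String (List String)) (v : List String) :
    clubs.foldl (fun d p => if u ∈ p.2 then d.modify u [] (fun l => l ++ [p.1]) else d)
      (d.insert u v) = d.insert u (v ++ fucL clubs u) := by
  induction clubs generalizing v with
  | nil => simp [fucL]
  | cons p cs ih =>
    by_cases h : u ∈ p.2
    · have hstep : (d.insert u v).modify u [] (fun l => l ++ [p.1]) = d.insert u (v ++ [p.1]) := by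
        rw [fuc_modify_eq_insert, PySem.Dict.getD_insert_self, PySem.Dict.insert_insert_self]
      simp only [List.foldl_cons]
      rw [if_pos h, hstep, ih (v ++ [p.1])]
      simp [fucL, h]
    · simp only [List.foldl_cons]
      rw [if_neg h, ih v]
      simp [fucL, h]

-- B's per-club loop over a nodup member list: one append for the member u, nothing else at u
theorem fuc_innerB (l : List String) (hl : l.Nodup) (c : String)
    (d : PySem.Dict String (List String)) (u : String) :
    ((l.foldl (fun d m => d.modify m [] (fun v => v ++ [c])) d).getD u []) =
      d.getD u [] ++ (if u ∈ l then [c] else []) := by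
  induction l generalizing d with
  | nil => simp
  | cons a l ih =>
    rcases List.nodup_cons.mp hl with ⟨ha, hl'⟩
    rw [List.foldl_cons, ih hl']
    rw [PySem.Dict.getD_modify]
    by_cases hu : u = a
    · subst hu; simp [ha]
    · simp [hu]

-- the index lookup returns exactly fucL
theorem fuc_index_getD (clubs : List (String × List String))
    (d : PySem.Dict String (List String)) (u : String) :
    (clubs.foldl (fun d p =>
        (PySem.List.dedup p.2).foldl (fun d m => d.modify m [] (fun l => l ++ [p.1])) d) d).getD u []
      = d.getD u [] ++ fucL clubs u := by
  induction clubs generalizing d with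
  | nil => simp [fucL]
  | cons p cs ih =>
    rw [List.foldl_cons, ih]
    rw [fuc_innerB (PySem.List.dedup p.2) (PySem.List.nodup_dedup p.2) p.1 d u]
    rw [List.append_assoc]
    congr 1
    by_cases h : u ∈ p.2 <;>
      simp [fucL, h, PySem.Set.mem_ofList]

theorem fucIndex_getD (clubs : List (String × List String)) (u : String) :
    (fucIndex clubs).getD u [] = fucL clubs u := by
  unfold fucIndex
  rw [fuc_index_getD]
  simp

-- the two outer loops compute the same dict
theorem fuc_outer (clubs : List (String × List String)) (users : List String)
    (d : PySem.Dict String (List String)) :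
    users.foldl (fun d user =>
        clubs.foldl (fun d p => if user ∈ p.2 then d.modify user [] (fun l => l ++ [p.1]) else d)
          (d.insert user [])) d
      = users.foldl (fun d user => d.insert user ((fucIndex clubs).getD user [])) d := by
  induction users generalizing d with
  | nil => rfl
  | cons u us ih =>
    rw [List.foldl_cons, List.foldl_cons, fuc_innerA, fucIndex_getD]
    simp only [List.nil_append]
    exact ih _

-- ===== VERDICT (by name: the statement is the Claim_ definition above) =====
theorem find_user_clubs_spec : Claim_equal_find_user_clubs := by
  intro clubs users _
  unfold Spec_find_user_clubs find_user_clubs find_user_clubs_alt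
  rw [fuc_outer]
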